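-- pv_equiv track=rewrite | github.com/joleen-tang/university-projects | Python/markov_chains/q1a_script.py | absorbed
-- ===== SOURCE A (Python) =====
-- def absorbed(current):
--     n=len(current)
--     for i in range(n-1):
--         if current[i-1]!=current[i] and current[i+1]!=current[i]:
--             #If there is an agent with no same neighbours
--             return False
--     if current[n-2]!=current[n-1] and current[0]!=current[n-1]:
--         return False
--     return True
-- ===== SOURCE B (Python) =====
-- def absorbed(current):
--     last = current[-1]
--     runs = []
--     run_val = current[0]
--     run_len = 0
--     for x in current:
--         if x == run_val:
--             run_len += 1
--         else:
--             runs.append(run_len)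
--             run_val = x
--             run_len = 1
--     runs.append(run_len)
--     if len(runs) > 1 and current[0] == last:
--         runs[0] += runs.pop()
--     return len(runs) == 1 or all(r >= 2 for r in runs)
-- ===== Notes on version B (the rewrite author's own statement) =====
-- stated objective: alternative
-- what changed: B run-length-encodes the list in one pass, merges the first and last run when the circular wrap joins them, and answers true iff there is a single run or every (circular) run has length >= 2, instead of A's per-index scan comparing each element with both neighbours.
import Mathlib
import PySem

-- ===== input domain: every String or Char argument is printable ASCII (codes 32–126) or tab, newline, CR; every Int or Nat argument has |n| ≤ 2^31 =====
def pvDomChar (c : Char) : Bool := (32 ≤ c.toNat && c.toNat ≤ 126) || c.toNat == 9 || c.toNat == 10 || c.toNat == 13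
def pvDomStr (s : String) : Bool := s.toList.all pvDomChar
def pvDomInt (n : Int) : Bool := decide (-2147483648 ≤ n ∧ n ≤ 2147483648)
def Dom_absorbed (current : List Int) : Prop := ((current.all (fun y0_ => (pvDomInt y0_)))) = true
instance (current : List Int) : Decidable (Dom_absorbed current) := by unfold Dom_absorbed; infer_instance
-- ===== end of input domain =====

-- B run-length-encodes the list in one pass, merges first and last run across the circular wrap,
-- and answers true iff there is one run or every circular run has length ≥ 2 (objective: alternative).

-- ===== PORT A =====
def absorbed (current : List Int) : Bool :=
  let n : Int := current.length
  if (PySem.List.pyRange 0 (n - 1) 1).any (fun i =>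
        (PySem.List.pyGetD current (i - 1) 0 != PySem.List.pyGetD current i 0) &&
        (PySem.List.pyGetD current (i + 1) 0 != PySem.List.pyGetD current i 0))
  then false
  else if (PySem.List.pyGetD current (n - 2) 0 != PySem.List.pyGetD current (n - 1) 0) &&
          (PySem.List.pyGetD current 0 0 != PySem.List.pyGetD current (n - 1) 0)
  then false
  else true

-- ===== PORT B =====
def absorbed_alt (current : List Int) : Bool :=
  let last : Int := PySem.List.pyGetD current (-1) 0
  let first : Int := PySem.List.pyGetD current 0 0
  -- the loop: state (runs, run_len, run_val)
  let st := current.foldl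
      (fun (st : List Int × Int × Int) x =>
        if x == st.2.2 then (st.1, st.2.1 + 1, st.2.2)
        else (st.1 ++ [st.2.1], 1, x))
      (([] : List Int), 0, first)
  let runs : List Int := st.1 ++ [st.2.1]
  -- runs[0] += runs.pop() when the wrap joins first and last run
  let runs2 : List Int :=
    if 1 < runs.length && (first == last)
    then (runs.headD 0 + runs.getLastD 0) :: runs.tail.dropLast
    else runs
  (runs2.length == 1) || runs2.all (fun r => decide (2 ≤ r))

-- ===== PRECONDITION & SPEC =====
-- Pre_ excludes exactly the empty list, on which the Python A raises IndexError (B raises there too).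
def Pre_absorbed (current : List Int) : Prop := current ≠ []
instance (current : List Int) : Decidable (Pre_absorbed current) := by unfold Pre_absorbed; infer_instance
def pvWitness_absorbed : List Int := [1, 1, 2, 2]

def Spec_absorbed (current : List Int) (out : Bool) : Prop := out = absorbed_alt current
instance (current : List Int) (out : Bool) : Decidable (Spec_absorbed current out) := by unfold Spec_absorbed; infer_instance

-- ===== CLAIM (what is proved, stated in full; the proofs are below) =====
def Claim_equal_absorbed : Prop := ∀ (current : List Int), Dom_absorbed current → Pre_absorbed current → Spec_absorbed current (absorbed current)

-- ===== LEMMAS AND PROOFS =====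

-- ---------- A side: absorbed = no circularly isolated index ----------

def badOf (current : List Int) (k : Nat) : Bool :=
  (decide (current.getD k 0 ≠ current.getD ((k + (current.length - 1)) % current.length) 0)) &&
  (decide (current.getD ((k + 1) % current.length) 0 ≠ current.getD k 0))

theorem any_congr_mem {α : Type} (l : List α) (p q : α → Bool) (h : ∀ x ∈ l, p x = q x) :
    l.any p = l.any q := by
  induction l with
  | nil => rfl
  | cons x t ih =>
    simp only [List.any_cons]
    rw [h x (by simp), ih (fun y hy => h y (by simp [hy]))]

theorem all_congr_mem {α : Type} (l : List α) (p q : α → Bool) (h : ∀ x ∈ l, p x = q x) :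
    l.all p = l.all q := by
  induction l with
  | nil => rfl
  | cons x t ih =>
    simp only [List.all_cons]
    rw [h x (by simp), ih (fun y hy => h y (by simp [hy]))]

theorem ite_ite_not_or (a b : Bool) :
    (if a = true then false else if b = true then false else true) = !(a || b) := by
  cases a <;> cases b <;> simp

theorem getLast_eq_getD (l : List Int) (h : l ≠ []) :
    l.getLast h = l.getD (l.length - 1) 0 := by
  rw [List.getLast_eq_getElem, List.getD_eq_getElem l 0 (by
    have := List.length_pos_iff.mpr h; omega)]

theorem absorbed_eq (current : List Int) (h : current ≠ []) :
    absorbed current = !((List.range current.length).any (badOf current)) := by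
  have hn : 1 ≤ current.length := List.length_pos_iff.mpr h
  obtain ⟨m, hm⟩ : ∃ m, current.length = m + 1 := ⟨current.length - 1, by omega⟩
  simp only [absorbed]
  have hcast : (current.length : Int) - 1 = ((m : Nat) : Int) := by omega
  rw [hcast, PySem.List.pyRange_zero_nat, List.any_map, ite_ite_not_or, hm,
    List.range_succ, List.any_append]
  congr 1
  congr 1
  · apply any_congr_mem
    intro k hk
    have hk' : k < m := List.mem_range.mp hk
    simp only [Function.comp]
    have h1 : ((k : Int)) + 1 = ((k + 1 : Nat) : Int) := by omega
    rw [h1, PySem.List.pyGetD_natCast, PySem.List.pyGetD_natCast]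
    have hmod1 : (k + 1) % current.length = k + 1 := Nat.mod_eq_of_lt (by omega)
    cases k with
    | zero =>
      rw [show ((0:Nat) : Int) - 1 = -1 by omega, PySem.List.pyGetD_neg_one current 0 h,
        getLast_eq_getD]
      simp [badOf, hm, ne_comm]
      rw [show 1 % (m+1) = 1 from Nat.mod_eq_of_lt (by omega)]
      simp [bne, Bool.beq_eq_decide_eq, eq_comm]
    | succ j =>
      rw [show ((j+1:Nat) : Int) - 1 = ((j : Nat) : Int) by omega, PySem.List.pyGetD_natCast]
      simp only [badOf, hmod1]
      rw [show (j + 1 + (current.length - 1)) % current.length = j by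
        rw [show j + 1 + (current.length - 1) = j + current.length by omega,
          Nat.add_mod_right, Nat.mod_eq_of_lt (by omega)]]
      simp [bne, Bool.beq_eq_decide_eq, eq_comm]
  · -- final check = badOf at m
    simp only [List.any_cons, List.any_nil, Bool.or_false]
    cases m with
    | zero =>
      norm_num
      simp [badOf, hm]
    | succ j =>
      rw [show (((j + 1 + 1 : Nat) : Int) - 2) = ((j : Nat) : Int) by push_cast; ring]
      simp only [PySem.List.pyGetD_natCast, badOf, hm]
      rw [show (j + 1 + (j + 1 + 1 - 1)) % (j + 1 + 1) = j by
        rw [show j + 1 + (j + 1 + 1 - 1) = j + (j + 1 + 1) by omega,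
          Nat.add_mod_right, Nat.mod_eq_of_lt (by omega)],
        Nat.mod_self]
      simp [bne, Bool.beq_eq_decide_eq, eq_comm, PySem.List.pyGetD_zero]

-- ---------- the recursive circular checker okFrom, bridging A and B ----------

def okFrom (first prev : Int) : List Int → Bool
  | [] => true
  | [x] => (x == prev) || (x == first)
  | x :: y :: t => ((x == prev) || (x == y)) && okFrom first x (y :: t)

theorem okFrom_drop (c : List Int) :
    ∀ (m j : Nat), c.length - j = m → j < c.length →
      okFrom (c.getD 0 0) (c.getD ((j + (c.length - 1)) % c.length) 0) (c.drop j)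
        = (List.range (c.length - j)).all (fun i => !badOf c (j + i)) := by
  intro m
  induction m with
  | zero => intro j hm hj; omega
  | succ m ih =>
    intro j hm hj
    have hdrop : c.drop j = c.getD j 0 :: c.drop (j + 1) := by
      rw [List.drop_eq_getElem_cons hj]
      congr 1
      exact (List.getD_eq_getElem c 0 hj).symm
    by_cases hj1 : j + 1 = c.length
    · have hdrop1 : c.drop (j + 1) = [] := by
        rw [hj1]; exact List.drop_length
      rw [hdrop, hdrop1, show c.length - j = 1 by omega]
      have h1 : (j + 1) % c.length = 0 := by rw [hj1, Nat.mod_self]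
      simp only [okFrom, badOf, h1, List.range_one, List.all_cons, List.all_nil,
        Bool.and_true, Nat.add_zero]
      simp [Bool.beq_eq_decide_eq, eq_comm]
    · have hj2 : j + 1 < c.length := by omega
      have hdrop2 : c.drop (j + 1) = c.getD (j + 1) 0 :: c.drop (j + 2) := by
        rw [List.drop_eq_getElem_cons hj2]
        congr 1
        exact (List.getD_eq_getElem c 0 hj2).symm
      rw [hdrop, hdrop2,
        show okFrom (c.getD 0 0) (c.getD ((j + (c.length - 1)) % c.length) 0)
              (c.getD j 0 :: c.getD (j + 1) 0 :: c.drop (j + 2))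
            = (((c.getD j 0 == c.getD ((j + (c.length - 1)) % c.length) 0)
                || (c.getD j 0 == c.getD (j + 1) 0))
               && okFrom (c.getD 0 0) (c.getD j 0)
                    (c.getD (j + 1) 0 :: c.drop (j + 2))) from rfl,
        ← hdrop2]
      have hprev : c.getD ((j + 1 + (c.length - 1)) % c.length) 0 = c.getD j 0 := by
        rw [show j + 1 + (c.length - 1) = j + c.length by omega,
          Nat.add_mod_right, Nat.mod_eq_of_lt hj]
      have hrec := ih (j + 1) (by omega) hj2
      rw [hprev] at hrec
      rw [hrec, show c.length - j = (c.length - (j + 1)) + 1 by omega,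
        List.range_succ_eq_map, List.all_cons, List.all_map, Nat.add_zero]
      congr 1
      · -- head element: (x == prev || x == next) = !badOf c j
        have hmod : (j + 1) % c.length = j + 1 := Nat.mod_eq_of_lt hj2
        simp only [badOf, hmod]
        simp [Bool.beq_eq_decide_eq, ne_comm]
      · apply all_congr_mem
        intro i _
        simp only [Function.comp_apply]
        have harg : j + Nat.succ i = j + 1 + i := by omega
        rw [harg]

theorem okFrom_eq_not_any (c : List Int) (hc : c ≠ []) :
    okFrom (c.getD 0 0) (c.getD (c.length - 1) 0) c
      = !((List.range c.length).any (badOf c)) := by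
  have hn : 0 < c.length := List.length_pos_iff.mpr hc
  have h := okFrom_drop c c.length 0 (by omega) hn
  simp only [List.drop_zero, Nat.zero_add, Nat.sub_zero] at h
  rw [Nat.mod_eq_of_lt (by omega)] at h
  rw [h]
  simp [List.all_eq_not_any_not]

-- ---------- B side: run lengths ----------

def runsF (v k : Int) : List Int → List Int
  | [] => [k]
  | x :: t => if x = v then runsF v (k + 1) t else k :: runsF x 1 t

theorem foldl_runsF (l : List Int) (acc : List Int) (k v : Int) :
    ((l.foldl (fun (st : List Int × Int × Int) x =>
        if x == st.2.2 then (st.1, st.2.1 + 1, st.2.2)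
        else (st.1 ++ [st.2.1], 1, x)) (acc, k, v)).1
      ++ [(l.foldl (fun (st : List Int × Int × Int) x =>
        if x == st.2.2 then (st.1, st.2.1 + 1, st.2.2)
        else (st.1 ++ [st.2.1], 1, x)) (acc, k, v)).2.1])
    = acc ++ runsF v k l := by
  induction l generalizing acc k v with
  | nil => simp [runsF]
  | cons x t ih =>
    simp only [List.foldl_cons]
    by_cases hx : x = v
    · rw [if_pos (beq_iff_eq.mpr hx), ih]
      simp [runsF, hx]
    · rw [if_neg (by simp [hx]), ih]
      simp [runsF, hx]

theorem runsF_ne_nil (l : List Int) (v k : Int) : runsF v k l ≠ [] := by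
  induction l generalizing v k with
  | nil => simp [runsF]
  | cons x t ih => by_cases hx : x = v <;> simp [runsF, hx, ih]

theorem runsF_succ (l : List Int) (v k : Int) :
    runsF v (k + 1) l = ((runsF v k l).headD 0 + 1) :: (runsF v k l).tail := by
  induction l generalizing v k with
  | nil => simp [runsF]
  | cons x t ih => by_cases hx : x = v <;> simp [runsF, hx, ih]

theorem runsF_headD_ge (l : List Int) (v k : Int) : k ≤ (runsF v k l).headD 0 := by
  induction l generalizing v k with
  | nil => simp [runsF]
  | cons x t ih =>
    by_cases hx : x = v
    · simp only [runsF, if_pos hx]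
      have := ih v (k + 1); omega
    · simp [runsF, hx]

theorem runsF_mem_pos (l : List Int) (v k : Int) (hk : 1 ≤ k) :
    ∀ r ∈ runsF v k l, 1 ≤ r := by
  induction l generalizing v k with
  | nil => simpa [runsF] using hk
  | cons x t ih =>
    by_cases hx : x = v
    · simpa [runsF, hx] using ih v (k + 1) (by omega)
    · intro r hr
      simp only [runsF, if_neg hx, List.mem_cons] at hr
      rcases hr with rfl | hr
      · exact hk
      · exact ih x 1 le_rfl r hr

theorem runsF_singleton (l : List Int) (v k r : Int) (h : runsF v k l = [r]) :
    ∀ x ∈ l, x = v := by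
  induction l generalizing v k r with
  | nil => simp
  | cons x t ih =>
    by_cases hx : x = v
    · subst hx
      simp only [runsF] at h
      intro y hy
      rcases List.mem_cons.mp hy with rfl | hy
      · rfl
      · exact ih x (k + 1) r h y hy
    · simp only [runsF, if_neg hx] at h
      exact absurd (by simpa using congrArg List.tail h) (runsF_ne_nil t x 1)

-- run-length check: all ≥ 2 except the last entry is exempt when e = true
def allGE2x (e : Bool) : List Int → Bool
  | [] => true
  | [r] => e || decide (2 ≤ r)
  | r :: s :: t => decide (2 ≤ r) && allGE2x e (s :: t)

theorem allGE2x_false (l : List Int) : allGE2x false l = l.all (fun r => decide (2 ≤ r)) := by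
  induction l with
  | nil => rfl
  | cons r t ih =>
    cases t with
    | nil => simp [allGE2x]
    | cons s u => simp [allGE2x, ih]

theorem allGE2x_true_append (rs : List Int) (r : Int) :
    allGE2x true (rs ++ [r]) = rs.all (fun a => decide (2 ≤ a)) := by
  induction rs with
  | nil => simp [allGE2x]
  | cons a t ih =>
    cases t with
    | nil => simp [allGE2x]
    | cons b u =>
      simp only [List.cons_append, allGE2x]
      simp only [List.cons_append] at ih
      rw [ih]
      simp

theorem okFrom_runsF (first : Int) (l : List Int) (v : Int) :
    okFrom first v l = allGE2x ((l.getLastD v) == first) ((runsF v 1 l).tail) := by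
  induction l generalizing v with
  | nil => simp [okFrom, runsF, allGE2x]
  | cons x t ih =>
    cases t with
    | nil =>
      by_cases hx : x = v
      · subst hx
        simp [okFrom, runsF, allGE2x]
      · simp [okFrom, runsF, hx, allGE2x]
    | cons y u =>
      rw [show okFrom first v (x :: y :: u)
            = ((x == v || x == y) && okFrom first x (y :: u)) from rfl,
          List.getLastD_cons]
      by_cases hx : x = v
      · subst hx
        simp only [beq_self_eq_true, Bool.true_or, Bool.true_and]
        rw [ih x, List.getLastD_cons,
          show runsF x 1 (x :: y :: u) = runsF x (1 + 1) (y :: u) by simp [runsF],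
          runsF_succ, List.tail_cons]
      · have hbx : (x == v) = false := by simp [hx]
        rw [hbx, Bool.false_or,
          show runsF v 1 (x :: y :: u) = 1 :: runsF x 1 (y :: u) by simp [runsF, hx],
          List.tail_cons]
        by_cases hxy : x = y
        · subst hxy
          have hR : runsF x 1 (x :: u) = runsF x (1 + 1) u := by simp [runsF]
          obtain ⟨r, rs, hr⟩ : ∃ r rs, runsF x 1 u = r :: rs := by
            cases h : runsF x 1 u with
            | nil => exact absurd h (runsF_ne_nil u x 1)
            | cons a b => exact ⟨a, b, rfl⟩
          have hrge : 1 ≤ r := by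
            have := runsF_headD_ge u x 1
            rw [hr] at this
            simpa using this
          rw [show (x == x) = true by simp, Bool.true_and, ih x, List.getLastD_cons,
            hR, runsF_succ, hr]
          simp only [List.headD_cons, List.tail_cons]
          cases rs with
          | nil =>
            simp only [allGE2x]
            have : decide (2 ≤ r + 1) = true := by simp; omega
            simp [this]
          | cons s ss =>
            simp only [allGE2x]
            have : decide (2 ≤ r + 1) = true := by simp; omega
            simp [this]
        · have hby : (x == y) = false := by simp [hxy]
          rw [hby, Bool.false_and]
          have hne : y ≠ x := fun h => hxy h.symm
          rw [show runsF x 1 (y :: u) = 1 :: runsF y 1 u by simp [runsF, hne]]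
          obtain ⟨r, rs, hr⟩ : ∃ r rs, runsF y 1 u = r :: rs := by
            cases h : runsF y 1 u with
            | nil => exact absurd h (runsF_ne_nil u y 1)
            | cons a b => exact ⟨a, b, rfl⟩
          rw [hr]
          simp [allGE2x]

-- ---------- assembly ----------

theorem getLastD_eq_getLast (h d : Int) (t : List Int) :
    (h :: t).getLastD d = (h :: t).getLast (by simp) := by
  induction t generalizing h d with
  | nil => rfl
  | cons y u ih =>
    rw [List.getLastD_cons, ih y h]
    exact (List.getLast_cons (by simp)).symm

theorem absorbed_alt_eq (c : List Int) (hc : c ≠ []) :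
    absorbed_alt c = okFrom (c.getD 0 0) (c.getD (c.length - 1) 0) c := by
  match c, hc with
  | h :: t, _ =>
  have hne : (h :: t) ≠ ([] : List Int) := by simp
  rw [← getLast_eq_getD (h :: t) hne]
  have hget0 : (h :: t).getD 0 0 = h := rfl
  rw [hget0, okFrom_runsF]
  rw [getLastD_eq_getLast]
  simp only [absorbed_alt, PySem.List.pyGetD_neg_one (h :: t) 0 hne, PySem.List.pyGetD_zero]
  have hget0' : (h :: t).getD 0 0 = h := rfl
  rw [hget0']
  have hfold :
      ((List.foldl (fun (st : List Int × Int × Int) x =>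
          if x == st.2.2 then (st.1, st.2.1 + 1, st.2.2)
          else (st.1 ++ [st.2.1], 1, x)) (([] : List Int), 0, h) (h :: t)).1
        ++ [(List.foldl (fun (st : List Int × Int × Int) x =>
          if x == st.2.2 then (st.1, st.2.1 + 1, st.2.2)
          else (st.1 ++ [st.2.1], 1, x)) (([] : List Int), 0, h) (h :: t)).2.1])
      = runsF h 1 t := by
    simp only [List.foldl_cons]
    rw [if_pos (beq_iff_eq.mpr rfl)]
    simpa using foldl_runsF t [] (0 + 1) h
  rw [hfold]
  by_cases hH : h = (h :: t).getLast hne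
  · have hbeq : ((h :: t).getLast hne == h) = true := by simp [← hH]
    have hbeq' : (h == (h :: t).getLast hne) = true := by simp [← hH]
    have hrhs : runsF ((h :: t).getLast hne) 1 (h :: t) = runsF h (1 + 1) t := by
      rw [← hH]; simp [runsF]
    rw [hbeq, hbeq', hrhs, runsF_succ, List.tail_cons]
    cases hR : runsF h 1 t with
    | nil => exact absurd hR (runsF_ne_nil t h 1)
    | cons r rs =>
      rcases List.eq_nil_or_concat rs with rfl | ⟨init, q, rfl⟩
      · simp [allGE2x]
      · simp only [List.concat_eq_append] at hR ⊢
        have hrge : 1 ≤ r := by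
          have := runsF_headD_ge t h 1
          rw [hR] at this; simpa using this
        have hqge : 1 ≤ q := by
          refine runsF_mem_pos t h 1 le_rfl q ?_
          rw [hR]; simp
        rw [if_pos (by simp)]
        simp only [List.headD_cons, List.tail_cons]
        rw [show (r :: (init ++ [q])).getLastD 0 = q by
              rw [← List.cons_append, List.getLastD_concat],
            List.dropLast_concat, allGE2x_true_append]
        cases init with
        | nil => simp
        | cons a as =>
          have h2 : decide (2 ≤ r + q) = true := by simp; omega
          simp [h2]
  · have hne' : ¬ ((h :: t).getLast hne = h) := fun e => hH e.symm
    have hbeq : ((h :: t).getLast hne == h) = false := by simp [hne']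
    have hbeq' : (h == (h :: t).getLast hne) = false := by simp [hH]
    have hrhs : runsF ((h :: t).getLast hne) 1 (h :: t) = 1 :: runsF h 1 t := by
      simp [runsF, hH]
    rw [hbeq, hbeq', hrhs, List.tail_cons, allGE2x_false]
    rw [if_neg (by simp)]
    cases hR : runsF h 1 t with
    | nil => exact absurd hR (runsF_ne_nil t h 1)
    | cons r rs =>
      cases rs with
      | nil =>
        exfalso
        have hall : ∀ x ∈ t, x = h := runsF_singleton t h 1 r hR
        have hmem := List.getLast_mem hne
        rcases List.mem_cons.mp hmem with he | he
        · exact hH he.symm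
        · exact hH ((hall _ he).symm)
      | cons s ss => simp

-- ===== VERDICT (by name: the statement is the Claim_ definition above) =====
theorem absorbed_spec : Claim_equal_absorbed := by
  intro current _ h
  unfold Spec_absorbed
  rw [absorbed_eq current h, absorbed_alt_eq current h, okFrom_eq_not_any current h]
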